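-- pv_equiv track=rewrite | github.com/achsill/DSLR | describe.py | find_longest_element_length
-- ===== SOURCE A (Python) =====
-- def find_longest_element_length(list, header_length):
--     list_size = len(list)
--     i = 0
--     j = 0
--     longest_element_length = 0
--     format_string = ""
--     while j < header_length:
--         while i < list_size:
--             if (len(str(list[i][j])) > longest_element_length):
--                 longest_element_length = len(str(list[i][j]))
--             i += 1
--         j += 1
--         i = 0
--         if format_string == "":
--             format_string = format_string + "{:<" + str(longest_element_length + 2) + "}"
--         else:
--             format_string = format_string + "{:>" + str(longest_element_length + 2) + "}"
--         longest_element_length = 0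
--     return format_string
-- ===== SOURCE B (Python) =====
-- def find_longest_element_length(list, header_length):
--     n = header_length if header_length > 0 else 0
--     widths = [0] * n
--     for row in list:
--         widths = [w if w >= len(str(row[j])) else len(str(row[j]))
--                   for j, w in enumerate(widths)]
--     s = ""
--     for k in range(n - 1, 0, -1):
--         s = "{:>" + str(widths[k] + 2) + "}" + s
--     if n > 0:
--         s = "{:<" + str(widths[0] + 2) + "}" + s
--     return s
-- ===== Notes on version B (the rewrite author's own statement) =====
-- stated objective: alternative
-- what changed: A scans column-major with nested while-loops and appends to the format string with an empty-string check; B makes a single row-major pass maintaining a per-column widths vector by elementwise max, then assembles the format string back-to-front by prepending pieces for k from n-1 down to 1 and finally the left-aligned head.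
import Mathlib
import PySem

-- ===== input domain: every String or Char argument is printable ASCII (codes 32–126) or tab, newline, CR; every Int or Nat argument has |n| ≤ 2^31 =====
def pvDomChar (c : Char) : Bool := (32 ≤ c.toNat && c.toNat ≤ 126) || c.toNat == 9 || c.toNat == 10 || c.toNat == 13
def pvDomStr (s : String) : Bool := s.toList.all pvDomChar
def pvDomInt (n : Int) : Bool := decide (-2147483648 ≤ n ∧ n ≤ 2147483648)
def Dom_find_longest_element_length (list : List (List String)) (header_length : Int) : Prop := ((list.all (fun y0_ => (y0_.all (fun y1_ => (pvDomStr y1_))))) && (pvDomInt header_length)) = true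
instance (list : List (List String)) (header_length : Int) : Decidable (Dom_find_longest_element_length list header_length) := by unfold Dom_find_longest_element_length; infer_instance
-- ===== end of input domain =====

-- B replaces A's column-major nested scans with a row-major single pass maintaining a widths
-- vector, then assembles the format string back-to-front by prepending (objective: alternative).

-- ===== PORT A =====
def find_longest_element_length (list : List (List String)) (header_length : Int) : String :=
  (PySem.List.pyRange 0 header_length 1).foldl (fun fs j =>
    let L := list.foldl (fun acc row =>
      let l := PySem.Str.len (PySem.List.pyGetD row j "")
      if l > acc then l else acc) 0
    if fs == "" then fs ++ "{:<" ++ PySem.Int.toStr (L + 2) ++ "}"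
    else fs ++ "{:>" ++ PySem.Int.toStr (L + 2) ++ "}") ""

-- ===== PORT B =====  (Source B's locals n / widths / s become the helper defs pvAltN / pvAltWidths / pvAltS)
def pvAltN (header_length : Int) : Int := if header_length > 0 then header_length else 0

-- one row of Source B's loop: widths = [w if w >= len(str(row[j])) else len(str(row[j])) for j, w in enumerate(widths)]
def pvAltStep (ws : List Int) (row : List String) : List Int :=
  (PySem.List.enumerate ws 0).map (fun jw =>
    let l := PySem.Str.len (PySem.List.pyGetD row jw.1 "")
    if jw.2 ≥ l then jw.2 else l)

def pvAltWidths (list : List (List String)) (n : Int) : List Int :=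
  list.foldl pvAltStep (PySem.List.pyRepeat [0] n)

-- Source B's backward prepend loop: for k in range(n-1, 0, -1): s = "{:>"+str(widths[k]+2)+"}" + s
def pvAltS (widths : List Int) (n : Int) : String :=
  (PySem.List.pyRange (n - 1) 0 (-1)).foldl (fun s k =>
    "{:>" ++ PySem.Int.toStr (PySem.List.pyGetD widths k 0 + 2) ++ "}" ++ s) ""

def find_longest_element_length_alt (list : List (List String)) (header_length : Int) : String :=
  if pvAltN header_length > 0 then
    "{:<" ++ PySem.Int.toStr (PySem.List.pyGetD (pvAltWidths list (pvAltN header_length)) 0 0 + 2) ++ "}"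
      ++ pvAltS (pvAltWidths list (pvAltN header_length)) (pvAltN header_length)
  else pvAltS (pvAltWidths list (pvAltN header_length)) (pvAltN header_length)

-- ===== PRECONDITION & SPEC =====
-- Pre_ excludes exactly the ragged inputs with a row shorter than header_length, on which Python A raises IndexError.
def Pre_find_longest_element_length (list : List (List String)) (header_length : Int) : Prop :=
  ∀ row ∈ list, header_length ≤ (row.length : Int)
instance (list : List (List String)) (header_length : Int) : Decidable (Pre_find_longest_element_length list header_length) := by unfold Pre_find_longest_element_length; infer_instance
def pvWitness_find_longest_element_length : List (List String) × Int := ([["ab"], ["c"]], 1)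

def Spec_find_longest_element_length (list : List (List String)) (header_length : Int) (out : String) : Prop := out = find_longest_element_length_alt list header_length
instance (list : List (List String)) (header_length : Int) (out : String) : Decidable (Spec_find_longest_element_length list header_length out) := by unfold Spec_find_longest_element_length; infer_instance

-- ===== CLAIM (what is proved, stated in full; the proofs are below) =====
def Claim_equal_find_longest_element_length : Prop := ∀ (list : List (List String)) (header_length : Int), Dom_find_longest_element_length list header_length → Pre_find_longest_element_length list header_length → Spec_find_longest_element_length list header_length (find_longest_element_length list header_length)

-- ===== LEMMAS AND PROOFS =====

-- column maximum of string lengths (both programs compute this, in different orders)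
def pvW (list : List (List String)) (j : Int) : Int :=
  list.foldl (fun a row => max a (PySem.Str.len (PySem.List.pyGetD row j ""))) 0

-- concatenation of pieces for a list of column indices
def pvJoin (p : Int → String) : List Int → String
  | [] => ""
  | k :: ks => p k ++ pvJoin p ks

theorem pvJoin_append (p : Int → String) (a b : List Int) :
    pvJoin p (a ++ b) = pvJoin p a ++ pvJoin p b := by
  induction a with
  | nil =>
      apply String.toList_injective
      simp [pvJoin]
  | cons x xs ih =>
      apply String.toList_injective
      simp [pvJoin, String.toList_append, congrArg String.toList ih]

theorem pvJoin_congr (p q : Int → String) (ks : List Int)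
    (h : ∀ k ∈ ks, p k = q k) : pvJoin p ks = pvJoin q ks := by
  induction ks with
  | nil => rfl
  | cons k r ih =>
      simp only [pvJoin, h k (by simp), ih (fun x hx => h x (by simp [hx]))]

theorem pv_inner_eq (list : List (List String)) (j : Int) :
    list.foldl (fun acc row =>
      let l := PySem.Str.len (PySem.List.pyGetD row j "")
      if l > acc then l else acc) 0 = pvW list j := by
  unfold pvW
  apply PySem.List.foldl_congr_mem
  intro acc row _
  simp only []
  rcases le_total (PySem.Str.len (PySem.List.pyGetD row j "")) acc with h | h
  · rw [if_neg (by omega), max_eq_left h]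
  · rcases eq_or_lt_of_le h with h' | h'
    · rw [← h']; simp
    · rw [if_pos h', max_eq_right h]

-- A's outer loop, after the first column: pure appending of right-aligned pieces
theorem pv_tail_fold (W : Int → Int) (rest : List Int) (fs : String) (hfs : fs.toList ≠ []) :
    rest.foldl (fun fs j =>
        if fs == "" then fs ++ "{:<" ++ PySem.Int.toStr (W j + 2) ++ "}"
        else fs ++ "{:>" ++ PySem.Int.toStr (W j + 2) ++ "}") fs
      = fs ++ pvJoin (fun j => "{:>" ++ PySem.Int.toStr (W j + 2) ++ "}") rest := by
  induction rest generalizing fs with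
  | nil =>
      simp only [List.foldl_nil, pvJoin]
      apply String.toList_injective
      simp
  | cons j r ih =>
      have hne : (fs == "") = false := by
        simp only [beq_eq_false_iff_ne]
        intro h; exact hfs (by simp [h])
      rw [List.foldl_cons, hne]
      simp only [Bool.false_eq_true, if_false]
      rw [ih _ (by simp [String.toList_append, hfs])]
      simp only [pvJoin]
      apply String.toList_injective
      simp [String.toList_append]

-- B's row step on a widths table indexed by pyRange is an elementwise max
theorem pv_step_map (n : Int) (hn : 0 ≤ n) (g : Int → Int) (row : List String) :
    pvAltStep ((PySem.List.pyRange 0 n 1).map g) row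
      = (PySem.List.pyRange 0 n 1).map (fun j =>
          max (g j) (PySem.Str.len (PySem.List.pyGetD row j ""))) := by
  unfold pvAltStep
  rw [PySem.List.enumerate_eq_map_pyRange (d := 0)]
  have hlen : (PySem.List.len ((PySem.List.pyRange 0 n 1).map g)) = n := by
    simp [PySem.List.len_eq, PySem.List.length_pyRange_one, Int.toNat_of_nonneg hn]
  rw [hlen, List.map_map]
  apply List.map_congr_left
  intro j hj
  rcases (PySem.List.mem_pyRange_one).mp hj with ⟨hj0, hjn⟩
  have hget : PySem.List.pyGetD ((PySem.List.pyRange 0 n 1).map g) j 0 = g j :=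
    PySem.List.pyGetD_map_pyRange_of_nonneg g n j 0 hj0 hjn
  simp only [Function.comp, hget]
  rcases le_total (PySem.Str.len (PySem.List.pyGetD row j "")) (g j) with h | h
  · rw [if_pos h, max_eq_left h]
  · rcases eq_or_lt_of_le h with h' | h'
    · rw [h']; simp
    · rw [if_neg (by omega), max_eq_right h]

theorem pv_widths_fold (n : Int) (hn : 0 ≤ n) (rows : List (List String)) :
    ∀ (g : Int → Int),
    rows.foldl pvAltStep ((PySem.List.pyRange 0 n 1).map g)
      = (PySem.List.pyRange 0 n 1).map (fun j =>
          rows.foldl (fun a row => max a (PySem.Str.len (PySem.List.pyGetD row j ""))) (g j)) := by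
  induction rows with
  | nil => intro g; simp
  | cons r rest ih =>
      intro g
      rw [List.foldl_cons, pv_step_map n hn g r, ih]
      simp only [List.foldl_cons]

theorem pv_init_widths (n : Int) :
    PySem.List.pyRepeat [(0 : Int)] n = (PySem.List.pyRange 0 n 1).map (fun _ => 0) := by
  rw [PySem.List.pyRepeat_singleton, List.map_const', PySem.List.length_pyRange_one]
  simp

theorem pv_widths_eq (list : List (List String)) (n : Int) (hn : 0 ≤ n) :
    pvAltWidths list n = (PySem.List.pyRange 0 n 1).map (pvW list) := by
  unfold pvAltWidths
  rw [pv_init_widths, pv_widths_fold n hn list (fun _ => 0)]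
  rfl

-- B's backward prepend loop builds the pieces of columns 1..m in increasing order
theorem pv_back_fold (q : Int → String) (m : Nat) (s0 : String) :
    (PySem.List.pyRange (m : Int) 0 (-1)).foldl (fun s k => q k ++ s) s0
      = pvJoin q (PySem.List.pyRange 1 ((m : Int) + 1) 1) ++ s0 := by
  induction m generalizing s0 with
  | zero =>
      rw [PySem.List.pyRange_neg_one_eq_nil (by norm_num),
        PySem.List.pyRange_one_eq_nil (by norm_num)]
      apply String.toList_injective
      simp [pvJoin]
  | succ m ih =>
      rw [PySem.List.pyRange_neg_one_cons (by push_cast; omega), List.foldl_cons]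
      have h1 : ((m : Int) + 1) - 1 = (m : Int) := by ring
      push_cast
      rw [h1, ih (q ((m : Int) + 1) ++ s0)]
      rw [PySem.List.pyRange_one_succ_right (a := 1) (b := (m : Int) + 1) (by omega), pvJoin_append]
      apply String.toList_injective
      simp [pvJoin, String.toList_append]

-- ===== VERDICT (by name: the statement is the Claim_ definition above) =====
theorem find_longest_element_length_spec : Claim_equal_find_longest_element_length := by
  intro list h _hdom _hpre
  unfold Spec_find_longest_element_length find_longest_element_length find_longest_element_length_alt
  by_cases hpos : h > 0
  · have hnN : pvAltN h = h := by unfold pvAltN; rw [if_pos hpos]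
    rw [hnN]
    have hn : (0 : Int) ≤ h := le_of_lt hpos
    rw [if_pos hpos, pv_widths_eq list h hn]
    have hget : ∀ k : Int, 0 ≤ k → k < h →
        PySem.List.pyGetD ((PySem.List.pyRange 0 h 1).map (pvW list)) k 0 = pvW list k := by
      intro k hk0 hkh
      exact PySem.List.pyGetD_map_pyRange_of_nonneg (pvW list) h k 0 hk0 hkh
    have hB : pvAltS ((PySem.List.pyRange 0 h 1).map (pvW list)) h
        = pvJoin (fun j => "{:>" ++ PySem.Int.toStr (pvW list j + 2) ++ "}") (PySem.List.pyRange 1 h 1) ++ "" := by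
      unfold pvAltS
      have hm : ((h - 1).toNat : Int) = h - 1 := Int.toNat_of_nonneg (by omega)
      have hbf := pv_back_fold (fun k => "{:>" ++ PySem.Int.toStr (PySem.List.pyGetD ((PySem.List.pyRange 0 h 1).map (pvW list)) k 0 + 2) ++ "}") (h - 1).toNat ""
      rw [hm, show h - 1 + 1 = h by ring] at hbf
      rw [hbf]
      congr 1
      apply pvJoin_congr
      intro k hk
      rcases (PySem.List.mem_pyRange_one).mp hk with ⟨hk1, hkh⟩
      rw [hget k (by omega) hkh]
    rw [hB, hget 0 le_rfl hpos]
    rw [PySem.List.pyRange_one_cons hpos, List.foldl_cons]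
    simp only [pv_inner_eq, zero_add]
    have h0 : (("" : String) == "") = true := by simp
    rw [h0]
    simp only [if_true]
    rw [pv_tail_fold (pvW list) (PySem.List.pyRange 1 h 1)
      ("" ++ "{:<" ++ PySem.Int.toStr (pvW list 0 + 2) ++ "}") (by simp [String.toList_append])]
    apply String.toList_injective
    simp [String.toList_append]
  · have hnN : pvAltN h = 0 := by unfold pvAltN; rw [if_neg hpos]
    rw [hnN, if_neg (by norm_num)]
    rw [PySem.List.pyRange_one_eq_nil (by omega), List.foldl_nil]
    unfold pvAltS
    rw [PySem.List.pyRange_neg_one_eq_nil (by norm_num), List.foldl_nil]
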